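-- pv_equiv track=rewrite | github.com/charvi-laxmii/book_diary_project | modules/message_handler.py | sanitize_message
-- ===== SOURCE A (Python) =====
-- def sanitize_message(message: str) -> str:
--     punctuation = [".", ",", ":", ";", "?", "!"]
--
--     message = message.replace("\\", "")
--
--     for symbol in punctuation:
--         message = message.replace(f"{symbol} ", f"{symbol}").replace(
--             f"{symbol}", f"{symbol} "
--         )
--
--     message = message.replace(". . .", "...")
--
--     return message
-- ===== SOURCE B (Python) =====
-- def sanitize_message(message: str) -> str:
--     # Single left-to-right scan: drop backslashes, then ensure each
--     # punctuation mark is followed by a space (runs of spaces are kept).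
--     chars = [ch for ch in message if ch != "\\"]
--     out = []
--     for i, ch in enumerate(chars):
--         out.append(ch)
--         if ch in ".,:;?!" and (i + 1 == len(chars) or chars[i + 1] != " "):
--             out.append(" ")
--     return "".join(out).replace(". . .", "...")
-- ===== Notes on version B (the rewrite author's own statement) =====
-- stated objective: alternative
-- what changed: Replaces the six sequential pairs of whole-string replace passes with a single left-to-right character scan that inserts one space after each punctuation mark not already followed by a space (backslashes dropped by a filter), keeping the final '. . .'->'...' fixup.
import Mathlib
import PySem

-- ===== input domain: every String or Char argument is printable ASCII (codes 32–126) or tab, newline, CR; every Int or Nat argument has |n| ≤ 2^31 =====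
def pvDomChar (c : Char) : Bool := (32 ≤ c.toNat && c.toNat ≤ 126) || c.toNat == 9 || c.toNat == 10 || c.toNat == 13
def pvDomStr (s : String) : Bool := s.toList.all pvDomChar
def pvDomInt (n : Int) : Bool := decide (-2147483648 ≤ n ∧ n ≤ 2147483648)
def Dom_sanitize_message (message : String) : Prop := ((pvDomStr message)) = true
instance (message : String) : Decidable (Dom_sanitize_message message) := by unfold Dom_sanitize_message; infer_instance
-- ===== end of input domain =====

-- B replaces A's six pairs of whole-string replace passes by one character scan
-- that inserts a space after each punctuation mark not already followed by one
-- (objective: alternative single-pass decomposition; same results).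

-- ===== PORT A =====
def sanitize_message (message : String) : String :=
  let m := PySem.Str.replace message "\\" ""
  let m := PySem.Str.replace (PySem.Str.replace m ". " ".") "." ". "
  let m := PySem.Str.replace (PySem.Str.replace m ", " ",") "," ", "
  let m := PySem.Str.replace (PySem.Str.replace m ": " ":") ":" ": "
  let m := PySem.Str.replace (PySem.Str.replace m "; " ";") ";" "; "
  let m := PySem.Str.replace (PySem.Str.replace m "? " "?") "?" "? "
  let m := PySem.Str.replace (PySem.Str.replace m "! " "!") "!" "! "
  PySem.Str.replace m ". . ." "..."

-- ===== PORT B =====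
def pvPunct : List Char := ['.', ',', ':', ';', '?', '!']

-- one pass: emit each char; after a punctuation mark whose successor is not a space, emit one space
def pvScan : List Char → List Char
  | [] => []
  | x :: t => x :: (if x ∈ pvPunct ∧ t.head? ≠ some ' ' then ' ' :: pvScan t else pvScan t)

def sanitize_message_alt (message : String) : String :=
  let chars := message.toList.filter (fun ch => ch ≠ '\\')
  PySem.Str.replace (String.ofList (pvScan chars)) ". . ." "..."

-- ===== PRECONDITION & SPEC =====
def Spec_sanitize_message (message : String) (out : String) : Prop := out = sanitize_message_alt message
instance (message : String) (out : String) : Decidable (Spec_sanitize_message message out) := by unfold Spec_sanitize_message; infer_instance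

-- ===== CLAIM (what is proved, stated in full; the proofs are below) =====
def Claim_equal_sanitize_message : Prop := ∀ (message : String), Dom_sanitize_message message → Spec_sanitize_message message (sanitize_message message)

-- ===== LEMMAS AND PROOFS =====

-- the two replace passes A runs per symbol, as structural scans
def pvF1 (c : Char) : List Char → List Char
  | [] => []
  | [x] => [x]
  | x :: y :: t => if x = c ∧ y = ' ' then c :: pvF1 c t else x :: pvF1 c (y :: t)

def pvF2 (c : Char) : List Char → List Char
  | [] => []
  | x :: t => if x = c then c :: ' ' :: pvF2 c t else x :: pvF2 c t

-- generalised scan over a set of marks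
def pvG (P : List Char) : List Char → List Char
  | [] => []
  | x :: t => x :: (if x ∈ P ∧ t.head? ≠ some ' ' then ' ' :: pvG P t else pvG P t)

lemma go1_eq (c : Char) : ∀ (fuel : Nat) (l acc : List Char), l.length ≤ fuel →
    PySem.Chars.replace.go [c, ' '] [c] fuel l acc = acc.reverse ++ pvF1 c l := by
  intro fuel
  induction fuel with
  | zero =>
    intro l acc h
    have : l = [] := by cases l <;> simp_all
    subst this; simp [PySem.Chars.replace.go, pvF1]
  | succ n ih =>
    intro l acc h
    match l with
    | [] => simp [PySem.Chars.replace.go, pvF1]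
    | [x] =>
      have hpre : [c, ' '].isPrefixOf [x] = false := by simp [List.isPrefixOf]
      simp only [PySem.Chars.replace.go, hpre, Bool.false_eq_true, if_false]
      rw [ih [] (x :: acc) (by simp)]
      simp [pvF1]
    | x :: y :: t =>
      by_cases hxy : x = c ∧ y = ' '
      · have hpre : ([c, ' '] : List Char).isPrefixOf (x :: y :: t) = true := by
          simp [List.isPrefixOf, hxy.1, hxy.2]
        simp only [PySem.Chars.replace.go, hpre, if_true]
        rw [show List.drop ([c, ' '] : List Char).length (x :: y :: t) = t from rfl]
        rw [ih t _ (by simp at h ⊢; omega)]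
        simp [pvF1, hxy.1, hxy.2]
      · have hpre : [c, ' '].isPrefixOf (x :: y :: t) = false := by
          simp [List.isPrefixOf]; intro hx hy; exact hxy ⟨hx.symm, hy.symm⟩
        simp only [PySem.Chars.replace.go, hpre, Bool.false_eq_true, if_false]
        rw [ih (y :: t) (x :: acc) (by simp at h ⊢; omega)]
        simp [pvF1, hxy]

lemma go2_eq (c : Char) : ∀ (fuel : Nat) (l acc : List Char), l.length ≤ fuel →
    PySem.Chars.replace.go [c] [c, ' '] fuel l acc = acc.reverse ++ pvF2 c l := by
  intro fuel
  induction fuel with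
  | zero =>
    intro l acc h
    have : l = [] := by cases l <;> simp_all
    subst this; simp [PySem.Chars.replace.go, pvF2]
  | succ n ih =>
    intro l acc h
    match l with
    | [] => simp [PySem.Chars.replace.go, pvF2]
    | x :: t =>
      by_cases hx : x = c
      · have hpre : ([c] : List Char).isPrefixOf (x :: t) = true := by simp [List.isPrefixOf, hx]
        simp only [PySem.Chars.replace.go, hpre, if_true]
        rw [show List.drop ([c] : List Char).length (x :: t) = t from rfl]
        rw [ih t _ (by simp at h ⊢; omega)]
        simp [pvF2, hx]
      · have hpre : [c].isPrefixOf (x :: t) = false := by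
          simp [List.isPrefixOf]; exact fun hh => hx hh.symm
        simp only [PySem.Chars.replace.go, hpre, Bool.false_eq_true, if_false]
        rw [ih t (x :: acc) (by simp at h ⊢; omega)]
        simp [pvF2, hx]

lemma go0_eq : ∀ (fuel : Nat) (l acc : List Char), l.length ≤ fuel →
    PySem.Chars.replace.go ['\\'] [] fuel l acc = acc.reverse ++ l.filter (fun ch => ch ≠ '\\') := by
  intro fuel
  induction fuel with
  | zero =>
    intro l acc h
    have : l = [] := by cases l <;> simp_all
    subst this; simp [PySem.Chars.replace.go]
  | succ n ih =>
    intro l acc h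
    match l with
    | [] => simp [PySem.Chars.replace.go]
    | x :: t =>
      by_cases hx : x = '\\'
      · have hpre : (['\\'] : List Char).isPrefixOf (x :: t) = true := by simp [List.isPrefixOf, hx]
        simp only [PySem.Chars.replace.go, hpre, if_true]
        rw [show List.drop (['\\'] : List Char).length (x :: t) = t from rfl]
        rw [ih t _ (by simp at h ⊢; omega)]
        simp [hx]
      · have hpre : ['\\'].isPrefixOf (x :: t) = false := by
          simp [List.isPrefixOf]; exact fun hh => hx hh.symm
        simp only [PySem.Chars.replace.go, hpre, Bool.false_eq_true, if_false]
        rw [ih t (x :: acc) (by simp at h ⊢; omega)]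
        simp [hx]

lemma rep1_eq (c : Char) (l : List Char) :
    PySem.Chars.replace l [c, ' '] [c] = pvF1 c l := by
  rw [PySem.Chars.replace]
  simp only [List.isEmpty]
  rw [go1_eq c l.length l [] le_rfl]; rfl

lemma rep2_eq (c : Char) (l : List Char) :
    PySem.Chars.replace l [c] [c, ' '] = pvF2 c l := by
  rw [PySem.Chars.replace]
  simp only [List.isEmpty]
  rw [go2_eq c l.length l [] le_rfl]; rfl

lemma rep0_eq (l : List Char) :
    PySem.Chars.replace l ['\\'] [] = l.filter (fun ch => ch ≠ '\\') := by
  rw [PySem.Chars.replace]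
  simp only [List.isEmpty]
  rw [go0_eq l.length l [] le_rfl]; rfl

lemma pvG_head (P : List Char) (l : List Char) : (pvG P l).head? = l.head? := by
  cases l <;> simp [pvG]

lemma comp_eq (c : Char) (hc : c ≠ ' ') : ∀ (l : List Char), pvF2 c (pvF1 c l) = pvG [c] l
  | [] => by simp [pvF1, pvF2, pvG]
  | [x] => by
    by_cases hx : x = c <;> simp [pvF1, pvF2, pvG, hx]
  | x :: y :: t => by
    by_cases hxy : x = c ∧ y = ' '
    · have ih := comp_eq c hc t
      simp [pvF1, pvF2, pvG, hxy.1, hxy.2, Ne.symm hc, ih]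
    · have ih := comp_eq c hc (y :: t)
      by_cases hx : x = c
      · have hy : y ≠ ' ' := fun hy => hxy ⟨hx, hy⟩
        simp [pvF1, pvF2, pvG, hx, hy, ih]
      · simp [pvF1, pvF2, pvG, hx, ih]

lemma scan_step (c : Char) (P : List Char) (hc : c ≠ ' ') (hP : ' ' ∉ P) :
    ∀ (l : List Char), pvG [c] (pvG P l) = pvG (c :: P) l
  | [] => by simp [pvG]
  | x :: t => by
    have ih := scan_step c P hc hP t
    by_cases hA : x ∈ P ∧ t.head? ≠ some ' '
    · simp [pvG, Ne.symm hc, hA.1, hA.2, ih]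
    · simp only [pvG, if_neg hA]
      by_cases hh : t.head? = some ' '
      · simp [pvG_head, hh, ih]
      · have hm : x ∉ P := fun hm => hA ⟨hm, hh⟩
        by_cases hx : x = c
        · simp [pvG_head, hx, hh, ih]
        · simp [pvG_head, hx, hh, hm, ih]

lemma pvG_nil : ∀ (l : List Char), pvG [] l = l
  | [] => rfl
  | x :: t => by simp [pvG, pvG_nil t]

lemma pvG_congr (P Q : List Char) (h : ∀ x, x ∈ P ↔ x ∈ Q) :
    ∀ (l : List Char), pvG P l = pvG Q l
  | [] => rfl
  | x :: t => by
    have ih := pvG_congr P Q h t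
    by_cases hx : x ∈ P ∧ t.head? ≠ some ' '
    · have hq : x ∈ Q ∧ t.head? ≠ some ' ' := ⟨(h x).mp hx.1, hx.2⟩
      simp [pvG, if_pos hx, if_pos hq, ih]
    · have hq : ¬ (x ∈ Q ∧ t.head? ≠ some ' ') := fun hq => hx ⟨(h x).mpr hq.1, hq.2⟩
      simp [pvG, if_neg hx, if_neg hq, ih]

lemma pvScan_eq_pvG : ∀ (l : List Char), pvScan l = pvG pvPunct l
  | [] => rfl
  | x :: t => by simp [pvScan, pvG, pvScan_eq_pvG t]

-- the six sequential replace pairs equal the single scan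
lemma chain_eq (l : List Char) :
    pvF2 '!' (pvF1 '!' (pvF2 '?' (pvF1 '?' (pvF2 ';' (pvF1 ';' (pvF2 ':' (pvF1 ':'
      (pvF2 ',' (pvF1 ',' (pvF2 '.' (pvF1 '.' l))))))))))) = pvScan l := by
  have h0 : l = pvG [] l := (pvG_nil l).symm
  rw [pvScan_eq_pvG]
  conv_lhs => rw [h0]
  rw [comp_eq '.' (by decide), scan_step '.' [] (by decide) (by decide),
      comp_eq ',' (by decide), scan_step ',' ['.'] (by decide) (by decide),
      comp_eq ':' (by decide), scan_step ':' [',', '.'] (by decide) (by decide),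
      comp_eq ';' (by decide), scan_step ';' [':', ',', '.'] (by decide) (by decide),
      comp_eq '?' (by decide), scan_step '?' [';', ':', ',', '.'] (by decide) (by decide),
      comp_eq '!' (by decide), scan_step '!' ['?', ';', ':', ',', '.'] (by decide) (by decide)]
  exact pvG_congr _ _ (by intro x; constructor <;> (intro h; fin_cases h <;> simp [pvPunct])) l

-- ===== VERDICT (by name: the statement is the Claim_ definition above) =====
set_option maxRecDepth 4096 in
theorem sanitize_message_spec : Claim_equal_sanitize_message := by
  intro message _
  unfold Spec_sanitize_message sanitize_message sanitize_message_alt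
  simp only [PySem.Str.replace]
  refine congrArg String.ofList ?_
  simp only [String.toList_ofList]
  rw [show ("" : String).toList = [] by decide,
      show ("\\" : String).toList = ['\\'] by decide,
      show (". " : String).toList = ['.', ' '] by decide,
      show ("." : String).toList = ['.'] by decide,
      show (", " : String).toList = [',', ' '] by decide,
      show ("," : String).toList = [','] by decide,
      show (": " : String).toList = [':', ' '] by decide,
      show (":" : String).toList = [':'] by decide,
      show ("; " : String).toList = [';', ' '] by decide,
      show (";" : String).toList = [';'] by decide,
      show ("? " : String).toList = ['?', ' '] by decide,
      show ("?" : String).toList = ['?'] by decide,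
      show ("! " : String).toList = ['!', ' '] by decide,
      show ("!" : String).toList = ['!'] by decide]
  rw [rep0_eq, rep1_eq, rep2_eq, rep1_eq, rep2_eq, rep1_eq, rep2_eq, rep1_eq, rep2_eq,
      rep1_eq, rep2_eq, rep1_eq, rep2_eq]
  rw [chain_eq]
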